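-- pv_equiv track=rewrite | github.com/ranoli90/Jobhuntin | migrate_to_render.py | _clean_schema_for_render
-- ===== SOURCE A (Python) =====
-- def _clean_schema_for_render(schema_sql: str) -> str:
--     """Remove Supabase-specific elements from schema."""
--     # Remove auth.users references (Render doesn't have Supabase auth)
--     schema_sql = schema_sql.replace("REFERENCES auth.users (id)", "")
--
--     # Remove Supabase realtime publications
--     lines = schema_sql.split('\n')
--     cleaned_lines = []
--     skip_next = False
--
--     for line in lines:
--         if 'ALTER PUBLICATION supabase_realtime' in line:
--             skip_next = True
--             continue
--         if skip_next and line.strip() == ';':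
--             skip_next = False
--             continue
--         if not skip_next:
--             cleaned_lines.append(line)
--
--     # Remove RLS policies (Render doesn't have Supabase RLS)
--     cleaned_sql = '\n'.join(cleaned_lines)
--     cleaned_sql = cleaned_sql.split('-- Row-Level Security')[0]
--
--     return cleaned_sql
-- ===== SOURCE B (Python) =====
-- def _clean_schema_for_render(schema_sql: str) -> str:
--     """Remove Supabase-specific elements from schema."""
--     schema_sql = schema_sql.replace("REFERENCES auth.users (id)", "")
--
--     # Stage 1: cut the line list into segments, each segment ending right
--     # after a line that is exactly ';' once stripped (the block terminator).
--     segments, cur = [], []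
--     for line in schema_sql.split('\n'):
--         cur.append(line)
--         if line.strip() == ';':
--             segments.append(cur)
--             cur = []
--     segments.append(cur)
--
--     # Stage 2: inside each segment, keep only the prefix before the first
--     # realtime-publication line (the rest of the segment is that statement).
--     kept = []
--     for seg in segments:
--         head = []
--         for line in seg:
--             if 'ALTER PUBLICATION supabase_realtime' in line:
--                 break
--             head.append(line)
--         kept.extend(head)
--
--     cleaned_sql = '\n'.join(kept)
--     return cleaned_sql.split('-- Row-Level Security')[0]
-- ===== Notes on version B (the rewrite author's own statement) =====
-- stated objective: alternative
-- what changed: A's single pass with a skip_next boolean flag threaded through every line is replaced by a staged group-then-filter algorithm: first cut the line list into segments each ending right after a semicolon-only terminator line, then keep only each segment's prefix before its first realtime-publication marker line; correct because the first terminator after a marker is exactly the end of the segment the marker lies in (segment interiors contain no terminator lines, and a marker line can never itself strip to a bare semicolon).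
import Mathlib
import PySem

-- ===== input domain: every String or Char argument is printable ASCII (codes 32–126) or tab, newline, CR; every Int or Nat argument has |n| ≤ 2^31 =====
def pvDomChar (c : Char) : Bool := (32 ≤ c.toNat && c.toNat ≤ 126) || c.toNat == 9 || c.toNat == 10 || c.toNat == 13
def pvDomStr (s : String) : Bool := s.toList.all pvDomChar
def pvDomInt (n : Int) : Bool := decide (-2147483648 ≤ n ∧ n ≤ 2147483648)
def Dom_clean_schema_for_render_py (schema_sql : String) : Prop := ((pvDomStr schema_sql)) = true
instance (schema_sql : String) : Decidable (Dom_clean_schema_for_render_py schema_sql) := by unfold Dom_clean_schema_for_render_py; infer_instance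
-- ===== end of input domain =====

-- B replaces A's one-pass boolean skip-flag state machine by a staged group-then-filter
-- algorithm: cut the lines into ';'-terminated segments, then keep each segment's prefix
-- before its first realtime marker; objective: alternative.


-- ===== PORT A =====
-- loop body of A's `for line in lines` (state = (cleaned_lines, skip_next))
def pvStepA (st : List String × Bool) (line : String) : List String × Bool :=
  if PySem.Str.isIn "ALTER PUBLICATION supabase_realtime" line then (st.1, true)
  else if st.2 && (PySem.Str.strip line == ";") then (st.1, false)
  else if !st.2 then (st.1 ++ [line], st.2)
  else st

def clean_schema_for_render_py (schema_sql : String) : String :=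
  let s := PySem.Str.replace schema_sql "REFERENCES auth.users (id)" ""
  let lines := (PySem.Str.split? s "\n").getD []
  let r := lines.foldl pvStepA ([], false)
  let cleaned := PySem.Str.join "\n" r.1
  ((PySem.Str.split? cleaned "-- Row-Level Security").getD []).headD ""

-- ===== PORT B =====
-- stage 1: `for line …: cur.append(line); if line.strip()==';': close segment` + final append
def pvSegLoop (cur : List String) : List String → List (List String)
  | [] => [cur]
  | l :: ls =>
    if PySem.Str.strip l == ";" then (cur ++ [l]) :: pvSegLoop [] ls
    else pvSegLoop (cur ++ [l]) ls

-- stage 2 inner loop: the prefix of a segment before its first realtime-marker line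
def pvHead : List String → List String
  | [] => []
  | l :: ls =>
    if PySem.Str.isIn "ALTER PUBLICATION supabase_realtime" l then []
    else l :: pvHead ls

def clean_schema_for_render_py_alt (schema_sql : String) : String :=
  let s := PySem.Str.replace schema_sql "REFERENCES auth.users (id)" ""
  let segments := pvSegLoop [] ((PySem.Str.split? s "\n").getD [])
  let kept := segments.foldl (fun acc seg => acc ++ pvHead seg) []
  ((PySem.Str.split? (PySem.Str.join "\n" kept) "-- Row-Level Security").getD []).headD ""

-- ===== PRECONDITION & SPEC =====
def Spec_clean_schema_for_render_py (schema_sql : String) (out : String) : Prop := out = clean_schema_for_render_py_alt schema_sql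
instance (schema_sql : String) (out : String) : Decidable (Spec_clean_schema_for_render_py schema_sql out) := by unfold Spec_clean_schema_for_render_py; infer_instance

-- ===== CLAIM (what is proved, stated in full; the proofs are below) =====
def Claim_equal_clean_schema_for_render_py : Prop := ∀ (schema_sql : String), Dom_clean_schema_for_render_py schema_sql → Spec_clean_schema_for_render_py schema_sql (clean_schema_for_render_py schema_sql)

-- ===== LEMMAS AND PROOFS =====

-- a char that is not whitespace survives `strip`
theorem pv_mem_dropWhile {c : Char} : ∀ {l : List Char}, c ∈ l → PySem.Chars.isspace c = false →
    c ∈ l.dropWhile PySem.Chars.isspace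
  | [], h, _ => absurd h (List.not_mem_nil)
  | a :: l, h, hc => by
      by_cases ha : PySem.Chars.isspace a = true
      · rw [List.dropWhile_cons_of_pos ha]
        rcases List.mem_cons.1 h with rfl | h'
        · rw [hc] at ha; exact absurd ha (by simp)
        · exact pv_mem_dropWhile h' hc
      · rw [List.dropWhile_cons_of_neg ha]
        exact h

theorem pv_mem_strip {c : Char} {l : List Char} (h : c ∈ l) (hc : PySem.Chars.isspace c = false) :
    c ∈ PySem.Chars.strip l := by
  unfold PySem.Chars.strip PySem.Chars.rstrip PySem.Chars.lstrip
  exact List.mem_reverse.2 (pv_mem_dropWhile (List.mem_reverse.2 (pv_mem_dropWhile h hc)) hc)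

-- a line containing the realtime marker can never strip to the bare terminator ";"
theorem pv_marker_not_semi (l : String)
    (h : PySem.Str.isIn "ALTER PUBLICATION supabase_realtime" l = true) :
    (PySem.Str.strip l == ";") = false := by
  apply Bool.eq_false_iff.2
  intro hbeq
  have hEq : PySem.Str.strip l = ";" := by exact_mod_cast eq_of_beq hbeq
  have hT : (PySem.Str.strip l).toList = [';'] := by rw [hEq]; decide
  rw [PySem.Str.toList_strip] at hT
  have hinf : ("ALTER PUBLICATION supabase_realtime" : String).toList <:+: l.toList :=
    (PySem.Str.isIn_iff_infix _ _).1 h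
  have hA : 'A' ∈ l.toList := hinf.mem (by decide)
  have : 'A' ∈ PySem.Chars.strip l.toList := pv_mem_strip hA (by decide)
  rw [hT] at this
  exact absurd this (by decide)

-- unfolding lemmas for the two loop bodies
theorem pvStepA_eq (st : List String × Bool) (l : String) :
    pvStepA st l =
      if PySem.Str.isIn "ALTER PUBLICATION supabase_realtime" l then (st.1, true)
      else if st.2 && (PySem.Str.strip l == ";") then (st.1, false)
      else if !st.2 then (st.1 ++ [l], st.2) else st := rfl

theorem pvHead_cons (l : String) (ls : List String) :
    pvHead (l :: ls) =
      if PySem.Str.isIn "ALTER PUBLICATION supabase_realtime" l then []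
      else l :: pvHead ls := rfl

theorem pvSegLoop_cons (cur : List String) (l : String) (ls : List String) :
    pvSegLoop cur (l :: ls) =
      if PySem.Str.strip l == ";" then (cur ++ [l]) :: pvSegLoop [] ls
      else pvSegLoop (cur ++ [l]) ls := rfl

-- pvHead past a marker-free prefix / once a marker has been seen
theorem pvHead_append_of_not : ∀ {cur : List String},
    cur.any (fun l => PySem.Str.isIn "ALTER PUBLICATION supabase_realtime" l) = false →
    ∀ xs : List String, pvHead (cur ++ xs) = cur ++ pvHead xs
  | [], _, xs => rfl
  | l :: cur, h, xs => by
      rw [List.any_cons, Bool.or_eq_false_iff] at h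
      show pvHead (l :: (cur ++ xs)) = l :: (cur ++ pvHead xs)
      rw [pvHead_cons, if_neg (by rw [h.1]; simp), pvHead_append_of_not h.2 xs]

theorem pvHead_append_of_any : ∀ {cur : List String},
    cur.any (fun l => PySem.Str.isIn "ALTER PUBLICATION supabase_realtime" l) = true →
    ∀ xs : List String, pvHead (cur ++ xs) = pvHead cur
  | l :: cur, h, xs => by
      show pvHead (l :: (cur ++ xs)) = pvHead (l :: cur)
      cases hm : PySem.Str.isIn "ALTER PUBLICATION supabase_realtime" l with
      | true => rw [pvHead_cons, pvHead_cons, if_pos hm, if_pos hm]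
      | false =>
          rw [List.any_cons, hm, Bool.false_or] at h
          rw [pvHead_cons, pvHead_cons, if_neg (by rw [hm]; simp), if_neg (by rw [hm]; simp),
            pvHead_append_of_any h xs]

theorem pvHead_self_of_not {cur : List String}
    (h : cur.any (fun l => PySem.Str.isIn "ALTER PUBLICATION supabase_realtime" l) = false) :
    pvHead cur = cur := by
  have h2 := pvHead_append_of_not h []
  have h0 : pvHead ([] : List String) = [] := rfl
  rw [h0] at h2
  rw [List.append_nil] at h2
  exact h2

theorem pvHead_single_of_not {l : String}
    (hm : PySem.Str.isIn "ALTER PUBLICATION supabase_realtime" l = false) :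
    pvHead [l] = [l] := by
  rw [pvHead_cons, if_neg (by rw [hm]; simp)]
  rfl

-- the simulation: A's flag machine over the rest of the lines, with the current open
-- segment `cur` (A's flag = "cur contains a marker"), computes exactly B's segment heads
theorem pv_main : ∀ (lines cur acc : List String),
    (lines.foldl pvStepA (acc ++ pvHead cur,
        cur.any (fun l => PySem.Str.isIn "ALTER PUBLICATION supabase_realtime" l))).1
      = acc ++ (pvSegLoop cur lines).flatMap pvHead := by
  intro lines
  induction lines with
  | nil => intro cur acc; simp [pvSegLoop]
  | cons l ls ih =>
    intro cur acc
    rw [List.foldl_cons]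
    cases hm : PySem.Str.isIn "ALTER PUBLICATION supabase_realtime" l with
    | true =>
      have hsemi := pv_marker_not_semi l hm
      rw [pvStepA_eq, if_pos hm, pvSegLoop_cons, if_neg (by rw [hsemi]; simp)]
      have hany : (cur ++ [l]).any (fun l => PySem.Str.isIn "ALTER PUBLICATION supabase_realtime" l) = true := by
        simp only [List.any_append, List.any_cons, List.any_nil, hm, Bool.or_true, Bool.or_false]
      have hhead : pvHead (cur ++ [l]) = pvHead cur := by
        cases hc : cur.any (fun l => PySem.Str.isIn "ALTER PUBLICATION supabase_realtime" l) with
        | true => exact pvHead_append_of_any hc [l]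
        | false =>
            rw [pvHead_append_of_not hc [l], pvHead_self_of_not hc, pvHead_cons, if_pos hm,
              List.append_nil]
      have h2 := ih (cur ++ [l]) acc
      rw [hany, hhead] at h2
      exact h2
    | false =>
      cases hs : (PySem.Str.strip l == ";") with
      | true =>
        rw [pvSegLoop_cons, if_pos hs]
        cases hc : cur.any (fun l => PySem.Str.isIn "ALTER PUBLICATION supabase_realtime" l) with
        | true =>
          rw [pvStepA_eq, if_neg (by rw [hm]; simp), if_pos (by rw [hs]; simp)]
          have h2 := ih [] (acc ++ pvHead cur)
          simp only [pvHead, List.any_nil, List.append_nil] at h2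
          simp only [List.flatMap_cons]
          rw [pvHead_append_of_any hc [l], ← List.append_assoc]
          exact h2
        | false =>
          rw [pvStepA_eq, if_neg (by rw [hm]; simp), if_neg (by simp), if_pos (by simp)]
          have h2 := ih [] (acc ++ pvHead cur ++ [l])
          simp only [pvHead, List.any_nil, List.append_nil] at h2
          simp only [List.flatMap_cons]
          rw [pvHead_append_of_not hc [l], pvHead_single_of_not hm, pvHead_self_of_not hc]
          rw [pvHead_self_of_not hc] at h2
          simpa [List.append_assoc] using h2
      | false =>
        rw [pvSegLoop_cons, if_neg (by rw [hs]; simp)]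
        have hany : (cur ++ [l]).any (fun l => PySem.Str.isIn "ALTER PUBLICATION supabase_realtime" l)
            = cur.any (fun l => PySem.Str.isIn "ALTER PUBLICATION supabase_realtime" l) := by
          simp only [List.any_append, List.any_cons, List.any_nil, hm, Bool.or_false]
        cases hc : cur.any (fun l => PySem.Str.isIn "ALTER PUBLICATION supabase_realtime" l) with
        | true =>
          rw [pvStepA_eq, if_neg (by rw [hm]; simp), if_neg (by rw [hs]; simp), if_neg (by simp)]
          have h2 := ih (cur ++ [l]) acc
          rw [hany, hc, pvHead_append_of_any hc [l]] at h2
          exact h2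
        | false =>
          rw [pvStepA_eq, if_neg (by rw [hm]; simp), if_neg (by simp), if_pos (by simp)]
          have h2 := ih (cur ++ [l]) acc
          rw [hany, hc, pvHead_append_of_not hc [l], pvHead_single_of_not hm] at h2
          rw [pvHead_self_of_not hc]
          simpa [List.append_assoc] using h2

-- A's kept lines = B's kept lines
theorem pv_kept_eq (lines : List String) :
    (lines.foldl pvStepA ([], false)).1
      = (pvSegLoop [] lines).foldl (fun acc seg => acc ++ pvHead seg) [] := by
  rw [PySem.List.foldl_append_eq_flatMap]
  have h := pv_main lines [] []
  simp only [pvHead, List.any_nil, List.nil_append] at h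
  rw [List.nil_append]
  exact h

-- ===== VERDICT (by name: the statement is the Claim_ definition above) =====
theorem clean_schema_for_render_py_spec : Claim_equal_clean_schema_for_render_py := by
  intro s _hDom
  show clean_schema_for_render_py s = clean_schema_for_render_py_alt s
  simp only [clean_schema_for_render_py, clean_schema_for_render_py_alt, pv_kept_eq]
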